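-- pv_equiv track=rewrite | github.com/FacundoCasaccio/Programacion-1 | ejercicios/desafio_secuencia_pares.py | buscar_secuencias_pares_consecutivos
-- ===== SOURCE A (Python) =====
-- def buscar_secuencias_pares_consecutivos(matriz):
--     secuencias_encontradas = []
--
--     for i in range(len(matriz)):
--         secuencia_actual = []
--
--         for j in range(len(matriz[i])):
--             numero = matriz[i][j]
--
--             if numero % 2 == 0:
--                 secuencia_actual.append(numero)
--
--             elif numero % 2 != 0:
--
--                 if len(secuencia_actual) > 1:
--                     secuencias_encontradas.append(secuencia_actual)
--
--                 secuencia_actual = []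
--
--             if j == len(matriz[i]) - 1 and len(secuencia_actual) > 1:
--                 secuencias_encontradas.append(secuencia_actual)
--
--     return secuencias_encontradas
-- ===== SOURCE B (Python) =====
-- def buscar_secuencias_pares_consecutivos(matriz):
--     # Two-pointer run extraction: jump over each maximal even run at once, slice it out.
--     resultado = []
--     for fila in matriz:
--         i, n = 0, len(fila)
--         while i < n:
--             if fila[i] % 2 != 0:
--                 i += 1
--                 continue
--             j = i
--             while j < n and fila[j] % 2 == 0:
--                 j += 1
--             if j - i > 1:
--                 resultado.append(fila[i:j])
--             i = j
--     return resultado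
-- ===== Notes on version B (the rewrite author's own statement) =====
-- stated objective: simpler
-- what changed: Replaces the per-element buffer with odd-flush and end-of-row special case by two-pointer extraction of each maximal even run, sliced out directly; no trailing-index check needed.
import Mathlib
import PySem

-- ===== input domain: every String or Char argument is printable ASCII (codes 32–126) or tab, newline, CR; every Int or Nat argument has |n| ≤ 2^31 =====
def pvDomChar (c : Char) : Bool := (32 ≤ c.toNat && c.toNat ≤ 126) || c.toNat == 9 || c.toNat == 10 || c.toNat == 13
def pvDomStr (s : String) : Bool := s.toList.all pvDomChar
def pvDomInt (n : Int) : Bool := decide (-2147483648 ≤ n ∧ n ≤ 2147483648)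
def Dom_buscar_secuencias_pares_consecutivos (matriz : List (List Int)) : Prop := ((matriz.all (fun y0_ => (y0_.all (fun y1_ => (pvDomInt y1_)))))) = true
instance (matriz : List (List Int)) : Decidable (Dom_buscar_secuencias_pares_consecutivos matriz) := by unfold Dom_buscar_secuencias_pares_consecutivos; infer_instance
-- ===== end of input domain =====

-- B replaces A's per-element buffer with odd-flush and end-of-row special case by
-- two-pointer extraction of each maximal even run (simpler decomposition, same cost).


-- ===== PORT A =====
-- inner 'for j in range(len(fila))' loop of A, as structural recursion on the
-- remaining elements, carrying j, n = len(fila), the buffer cur and the accumulator acc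
def pvALoop (n : Nat) : Nat → List Int → List Int → List (List Int) → List (List Int)
  | _, [], _, acc => acc
  | j, numero :: rest, cur, acc =>
    let (acc, cur) :=
      if numero % 2 == 0 then (acc, cur ++ [numero])
      else if cur.length > 1 then (acc ++ [cur], ([] : List Int))
      else (acc, ([] : List Int))
    let (acc, cur) :=
      if j == n - 1 && cur.length > 1 then (acc ++ [cur], cur) else (acc, cur)
    pvALoop n (j + 1) rest cur acc

def buscar_secuencias_pares_consecutivos (matriz : List (List Int)) : List (List Int) :=
  matriz.foldl (fun acc fila => pvALoop fila.length 0 fila [] acc) []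

-- ===== PORT B =====
-- inner 'while i < n' loop of B: skip an odd element, or peel off the whole
-- maximal even run at once (fila[i:j] = head run = takeWhile even, continue at j = after the run)
def pvBRuns : List Int → List (List Int)
  | [] => []
  | x :: xs =>
    if x % 2 == 0 then
      let run := x :: xs.takeWhile (fun y => y % 2 == 0)
      let rest := xs.dropWhile (fun y => y % 2 == 0)
      (if run.length > 1 then [run] else []) ++ pvBRuns rest
    else pvBRuns xs
termination_by l => l.length
decreasing_by
  · simpa using Nat.lt_succ_of_le (List.length_dropWhile_le _ _)
  · simp

def buscar_secuencias_pares_consecutivos_alt (matriz : List (List Int)) : List (List Int) :=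
  matriz.foldl (fun acc fila => acc ++ pvBRuns fila) []

-- ===== PRECONDITION & SPEC =====
def Spec_buscar_secuencias_pares_consecutivos (matriz : List (List Int)) (out : List (List Int)) : Prop := out = buscar_secuencias_pares_consecutivos_alt matriz
instance (matriz : List (List Int)) (out : List (List Int)) : Decidable (Spec_buscar_secuencias_pares_consecutivos matriz out) := by unfold Spec_buscar_secuencias_pares_consecutivos; infer_instance

-- ===== CLAIM (what is proved, stated in full; the proofs are below) =====
def Claim_equal_buscar_secuencias_pares_consecutivos : Prop := ∀ (matriz : List (List Int)), Dom_buscar_secuencias_pares_consecutivos matriz → Spec_buscar_secuencias_pares_consecutivos matriz (buscar_secuencias_pares_consecutivos matriz)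

-- ===== LEMMAS AND PROOFS =====

-- A's inner loop with the 'last index' test replaced by 'tail is empty'
def pvEmit : List Int → List Int → List (List Int)
  | _, [] => []
  | cur, numero :: rest =>
    let (out, cur) :=
      if numero % 2 == 0 then (([] : List (List Int)), cur ++ [numero])
      else if cur.length > 1 then ([cur], ([] : List Int))
      else ([], ([] : List Int))
    let out2 := if rest.isEmpty && cur.length > 1 then [cur] else []
    out ++ out2 ++ pvEmit cur rest

def pvFlush (cur : List Int) : List (List Int) := if cur.length > 1 then [cur] else []

-- A's loop with the final flush moved to the end of the list
def pvEmitF : List Int → List Int → List (List Int)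
  | cur, [] => pvFlush cur
  | cur, numero :: rest =>
    if numero % 2 == 0 then pvEmitF (cur ++ [numero]) rest
    else pvFlush cur ++ pvEmitF [] rest

theorem pvALoop_eq_emit (l : List Int) : ∀ (n j : Nat) (cur : List Int) (acc : List (List Int)),
    j + l.length = n → pvALoop n j l cur acc = acc ++ pvEmit cur l := by
  induction l with
  | nil => intro n j cur acc _; simp [pvALoop, pvEmit]
  | cons x xs ih =>
    intro n j cur acc h
    have hlast : (j == n - 1) = xs.isEmpty := by
      cases xs with
      | nil => simp at h ⊢; omega
      | cons y ys =>
        simp at h ⊢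
        omega
    simp only [pvALoop, pvEmit, hlast]
    split
    · rw [ih _ (j + 1) _ _ (by simp at h ⊢; omega)]
      split <;> simp
    · split
      · rw [ih _ (j + 1) _ _ (by simp at h ⊢; omega)]
        split <;> simp
      · rw [ih _ (j + 1) _ _ (by simp at h ⊢; omega)]
        split <;> simp

theorem pvEmit_eq_emitF : ∀ (l cur : List Int),
    pvEmit cur l = if l.isEmpty then [] else pvEmitF cur l := by
  intro l
  induction l with
  | nil => intro cur; simp [pvEmit]
  | cons x xs ih =>
    intro cur
    cases xs with
    | nil =>
      by_cases hx : (x % 2 == 0) = true <;>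
        · rw [pvEmit, pvEmitF]
          simp only [hx, Bool.false_eq_true, if_false, if_true, List.isEmpty_nil,
            List.isEmpty_cons, Bool.true_and]
          split_ifs <;> simp_all [pvEmit, pvEmitF, pvFlush]
    | cons y ys =>
      by_cases hx : (x % 2 == 0) = true
      · rw [pvEmit, pvEmitF]
        simp [hx, ih]
      · rw [pvEmit, pvEmitF]
        simp only [hx, Bool.false_eq_true, if_false, List.isEmpty_cons, Bool.false_and]
        split_ifs <;> simp [pvFlush, *]

theorem pvRuns_td (xs : List Int) :
    pvFlush (xs.takeWhile (fun y => y % 2 == 0)) ++ pvBRuns (xs.dropWhile (fun y => y % 2 == 0))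
      = pvBRuns xs := by
  cases xs with
  | nil => simp [pvBRuns, pvFlush]
  | cons z zs =>
    by_cases hz : (z % 2 == 0) = true
    · rw [pvBRuns]
      simp [hz, pvFlush]
    · simp [hz, pvFlush]

theorem pvEmitF_runs : ∀ (l cur : List Int),
    pvEmitF cur l = pvFlush (cur ++ l.takeWhile (fun y => y % 2 == 0))
      ++ pvBRuns (l.dropWhile (fun y => y % 2 == 0)) := by
  intro l
  induction l with
  | nil => intro cur; simp [pvEmitF, pvBRuns]
  | cons x xs ih =>
    intro cur
    by_cases hx : (x % 2 == 0) = true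
    · simp only [pvEmitF, hx, if_true, List.takeWhile_cons, List.dropWhile_cons]
      rw [ih (cur ++ [x])]
      simp
    · simp only [pvEmitF, List.takeWhile_cons, List.dropWhile_cons, hx,
        Bool.false_eq_true, if_false, List.append_nil]
      rw [ih [], List.nil_append, pvRuns_td xs]
      congr 1
      rw [pvBRuns]
      simp [hx]

theorem pvEmitF_nil_runs (l : List Int) : pvEmitF [] l = pvBRuns l := by
  rw [pvEmitF_runs, List.nil_append]
  exact pvRuns_td l

theorem pvEmit_nil_runs (l : List Int) : pvEmit [] l = pvBRuns l := by
  rw [pvEmit_eq_emitF]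
  cases l with
  | nil => simp [pvBRuns]
  | cons x xs => simp [pvEmitF_nil_runs]

theorem pvRow_eq (fila : List Int) (acc : List (List Int)) :
    pvALoop fila.length 0 fila [] acc = acc ++ pvBRuns fila := by
  rw [pvALoop_eq_emit fila fila.length 0 [] acc (by simp), pvEmit_nil_runs]

theorem pvFoldl_eq (m : List (List Int)) : ∀ (acc : List (List Int)),
    m.foldl (fun acc fila => pvALoop fila.length 0 fila [] acc) acc
      = m.foldl (fun acc fila => acc ++ pvBRuns fila) acc := by
  induction m with
  | nil => intro acc; rfl
  | cons f fs ih => intro acc; simp only [List.foldl_cons, pvRow_eq, ih]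

-- ===== VERDICT (by name: the statement is the Claim_ definition above) =====
theorem buscar_secuencias_pares_consecutivos_spec : Claim_equal_buscar_secuencias_pares_consecutivos := by
  intro matriz _
  unfold Spec_buscar_secuencias_pares_consecutivos
  unfold buscar_secuencias_pares_consecutivos buscar_secuencias_pares_consecutivos_alt
  exact pvFoldl_eq matriz []
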